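-- pv_equiv track=rewrite | github.com/matthewSorensen/plotterstuff | burin/process.py | cannonical_order
-- ===== SOURCE A (Python) =====
-- def cannonical_order(layers):
--     """ Take a bunch of layer names, and sort them consistently - first, all of the
--     layer names that are parsable as integers, in ascending order. Then, the rest of the layer names,
--     in lexicographical order.
--     """
--
--     good, bad = [], []
--     for l in layers:
--         try:
--             good.append((l,int(l)))
--         except:
--             bad.append(l)
--     return [x[0] for x in sorted(good, key = lambda x: x[1])] + list(sorted(bad))
-- ===== SOURCE B (Python) =====
-- def cannonical_order(layers):
--     """ Take a bunch of layer names, and sort them consistently - first, all of the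
--     layer names that are parsable as integers, in ascending order. Then, the rest of the layer names,
--     in lexicographical order.
--     """
--     def key(l):
--         try:
--             return (0, int(l), "")
--         except:
--             return (1, 0, l)
--     return sorted(layers, key=key)
-- ===== Notes on version B (the rewrite author's own statement) =====
-- stated objective: simpler
-- what changed: Replaces the partition-into-two-lists plus two separate sorts and a concatenation with one stable sorted() call over a tagged tuple key ((0,int(l),'') for integer-parsable names, (1,0,l) for the rest).
import Mathlib
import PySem

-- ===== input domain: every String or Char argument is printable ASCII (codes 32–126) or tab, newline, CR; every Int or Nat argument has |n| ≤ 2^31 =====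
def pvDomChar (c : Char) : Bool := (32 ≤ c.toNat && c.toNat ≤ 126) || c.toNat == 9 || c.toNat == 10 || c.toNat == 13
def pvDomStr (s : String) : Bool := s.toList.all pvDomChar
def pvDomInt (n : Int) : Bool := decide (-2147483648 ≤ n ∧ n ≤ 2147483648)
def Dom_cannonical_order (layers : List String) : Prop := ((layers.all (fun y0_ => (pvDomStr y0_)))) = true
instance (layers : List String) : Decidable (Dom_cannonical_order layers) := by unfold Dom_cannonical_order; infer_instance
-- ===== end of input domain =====

-- B replaces A's partition-plus-two-sorts with one stable keyed sort; same results, no speed claim.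
-- Python string comparison is code-point lexicographic, which is exactly List Char's `<` on `.toList`
-- (Lean's own String.< is not kernel-reducible, so both ports compare strings through .toList).

-- ===== PORT A =====
-- the try/int(l)/except loop: good collects (l, int(l)) in order, bad the unparsable names in order
def pvPartition (layers : List String) : List (String × Int) × List String :=
  layers.foldl
    (fun acc l =>
      match PySem.Int.ofStr? l with        -- int(l); none = ValueError (the bare except)
      | some n => (acc.1 ++ [(l, n)], acc.2)
      | none   => (acc.1, acc.2 ++ [l]))
    ([], [])

def cannonical_order (layers : List String) : List String :=
  let gb := pvPartition layers
  (PySem.List.sorted gb.1 (fun x => x.2)).map (fun x => x.1)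
    ++ PySem.List.sorted gb.2 (fun s => s.toList)

-- ===== PORT B =====
-- B's key(l): (0, int(l), "") if int(l) succeeds, else (1, 0, l)
def pvKey (l : String) : Int × Int × List Char :=
  match PySem.Int.ofStr? l with
  | some n => (0, n, [])
  | none   => (1, 0, l.toList)

-- Python's `<` on these 3-tuples, written out (Lean's Prod `<` is not tuple-lexicographic)
def pvKeyLt (a b : Int × Int × List Char) : Bool :=
  decide (a.1 < b.1) ||
    (decide (a.1 = b.1) &&
      (decide (a.2.1 < b.2.1) || (decide (a.2.1 = b.2.1) && decide (a.2.2 < b.2.2))))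

-- sorted(layers, key=key): PySem.List.sorted needs an LT key type, so the call is written in
-- sorted's own stable foldl/insertBy form (PySem.List.sorted_eq_foldl_insertBy) with pvKeyLt as the tuple `<`
def cannonical_order_alt (layers : List String) : List String :=
  layers.foldl (fun acc l => PySem.List.insertBy (fun a b => pvKeyLt (pvKey a) (pvKey b)) l acc) []

-- ===== PRECONDITION & SPEC =====
def Spec_cannonical_order (layers : List String) (out : List String) : Prop := out = cannonical_order_alt layers
instance (layers : List String) (out : List String) : Decidable (Spec_cannonical_order layers out) := by unfold Spec_cannonical_order; infer_instance

-- ===== CLAIM (what is proved, stated in full; the proofs are below) =====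
def Claim_equal_cannonical_order : Prop := ∀ (layers : List String), Dom_cannonical_order layers → Spec_cannonical_order layers (cannonical_order layers)

-- ===== LEMMAS AND PROOFS =====

theorem pv_insertBy_append_left (before : String → String → Bool) (x : String)
    (xs ys : List String) (h : ∀ y ∈ ys, before x y = true) :
    PySem.List.insertBy before x (xs ++ ys) = PySem.List.insertBy before x xs ++ ys := by
  induction xs with
  | nil =>
    cases ys with
    | nil => rfl
    | cons y ys => simp [PySem.List.insertBy, h y (by simp)]
  | cons a xs ih =>
    simp only [List.cons_append, PySem.List.insertBy]
    split <;> simp [ih]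

theorem pv_insertBy_append_right (before : String → String → Bool) (x : String)
    (xs ys : List String) (h : ∀ y ∈ xs, before x y = false) :
    PySem.List.insertBy before x (xs ++ ys) = xs ++ PySem.List.insertBy before x ys := by
  induction xs with
  | nil => rfl
  | cons a xs ih =>
    simp only [List.cons_append, PySem.List.insertBy, h a (by simp)]
    simp [ih fun y hy => h y (by simp [hy])]

theorem pv_map_insertBy (f : String × Int → String)
    (ba : String × Int → String × Int → Bool) (bf : String → String → Bool)
    (x : String × Int) (ys : List (String × Int))
    (h : ∀ y ∈ ys, ba x y = bf (f x) (f y)) :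
    (PySem.List.insertBy ba x ys).map f = PySem.List.insertBy bf (f x) (ys.map f) := by
  induction ys with
  | nil => rfl
  | cons a ys ih =>
    simp only [PySem.List.insertBy, List.map_cons, h a (by simp)]
    split <;> simp_all

theorem pv_insertBy_congr (b1 b2 : String → String → Bool) (x : String) (ys : List String)
    (h : ∀ y ∈ ys, b1 x y = b2 x y) :
    PySem.List.insertBy b1 x ys = PySem.List.insertBy b2 x ys := by
  induction ys with
  | nil => rfl
  | cons a ys ih =>
    simp only [PySem.List.insertBy, h a (by simp)]
    split <;> simp_all

theorem pv_sorted_snoc {α κ : Type} [LT κ] [DecidableLT κ] (xs : List α) (x : α) (key : α → κ) :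
    PySem.List.sorted (xs ++ [x]) key
      = PySem.List.insertBy (fun a b => decide (key a < key b)) x (PySem.List.sorted xs key) := by
  rw [PySem.List.sorted_eq_foldl_insertBy, PySem.List.sorted_eq_foldl_insertBy, List.foldl_append]
  rfl

theorem pvPartition_snoc (p : List String) (l : String) :
    pvPartition (p ++ [l]) =
      match PySem.Int.ofStr? l with
      | some n => ((pvPartition p).1 ++ [(l, n)], (pvPartition p).2)
      | none   => ((pvPartition p).1, (pvPartition p).2 ++ [l]) := by
  simp [pvPartition, List.foldl_append]

theorem pvPartition_good (p : List String) :
    ∀ x ∈ (pvPartition p).1, PySem.Int.ofStr? x.1 = some x.2 := by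
  induction p using List.reverseRecOn with
  | nil => simp [pvPartition]
  | append_singleton p l ih =>
    rw [pvPartition_snoc]
    cases h : PySem.Int.ofStr? l with
    | some n =>
      intro x hx
      simp only at hx
      rcases List.mem_append.1 hx with hx | hx
      · exact ih x hx
      · simp at hx; subst hx; exact h
    | none => exact ih

theorem pvPartition_bad (p : List String) :
    ∀ y ∈ (pvPartition p).2, PySem.Int.ofStr? y = none := by
  induction p using List.reverseRecOn with
  | nil => simp [pvPartition]
  | append_singleton p l ih =>
    rw [pvPartition_snoc]
    cases h : PySem.Int.ofStr? l with
    | some n => exact ih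
    | none =>
      intro y hy
      simp only at hy
      rcases List.mem_append.1 hy with hy | hy
      · exact ih y hy
      · simp at hy; subst hy; exact h

theorem pv_main (p : List String) :
    cannonical_order_alt p
      = (PySem.List.sorted (pvPartition p).1 (fun x => x.2)).map (fun x => x.1)
        ++ PySem.List.sorted (pvPartition p).2 (fun s => s.toList) := by
  induction p using List.reverseRecOn with
  | nil => rfl
  | append_singleton p l ih =>
    have halt : cannonical_order_alt (p ++ [l])
        = PySem.List.insertBy (fun a b => pvKeyLt (pvKey a) (pvKey b)) l (cannonical_order_alt p) := by
      simp [cannonical_order_alt, List.foldl_append]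
    rw [halt, ih, pvPartition_snoc]
    cases h : PySem.Int.ofStr? l with
    | some n =>
      dsimp only
      -- all non-parsable names have strictly larger key: insertion lands in the good block
      rw [pv_insertBy_append_left _ _ _ _ (by
        intro y hy
        have hyb := pvPartition_bad p y ((PySem.List.mem_sorted _ _ _ y).1 hy)
        simp [pvKey, h, hyb, pvKeyLt])]
      rw [← pv_map_insertBy (fun x => x.1) (fun a b => decide (a.2 < b.2))
            (fun a b => pvKeyLt (pvKey a) (pvKey b)) (l, n)
            (PySem.List.sorted (pvPartition p).1 (fun x => x.2)) (by
        intro y hy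
        have hyg := pvPartition_good p y ((PySem.List.mem_sorted _ _ _ y).1 hy)
        simp [pvKey, h, hyg, pvKeyLt])]
      simp [pv_sorted_snoc]
    | none =>
      dsimp only
      -- every integer-parsable name has strictly smaller key: insertion skips the good block
      rw [pv_insertBy_append_right _ _ _ _ (by
        intro y hy
        rcases List.mem_map.1 hy with ⟨z, hz, rfl⟩
        have hzg := pvPartition_good p z ((PySem.List.mem_sorted _ _ _ z).1 hz)
        simp [pvKey, h, hzg, pvKeyLt])]
      rw [pv_insertBy_congr _ (fun a b => decide (a.toList < b.toList)) _ _ (by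
        intro y hy
        have hyb := pvPartition_bad p y ((PySem.List.mem_sorted _ _ _ y).1 hy)
        simp [pvKey, h, hyb, pvKeyLt])]
      simp [pv_sorted_snoc]

-- ===== VERDICT (by name: the statement is the Claim_ definition above) =====
theorem cannonical_order_spec : Claim_equal_cannonical_order := by
  intro layers _
  unfold Spec_cannonical_order
  rw [pv_main]
  rfl
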